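-- pv_equiv track=rewrite | github.com/muokicaleb/interview_code_questions | pocker.py | shuffle_cards
-- ===== SOURCE A (Python) =====
-- def shuffle_cards(list_cards):
--     second_pile = []
--
--     for i, card in enumerate(list_cards):
--         if i % 2 == 0:
--             second_pile.insert(0, card)
--         else:
--             second_pile.append(card)
--     return second_pile
-- ===== SOURCE B (Python) =====
-- def shuffle_cards(list_cards):
--     # One pass with two append-only piles and a parity toggle; single reverse at the end
--     # replaces A's repeated O(n) front-insertions.
--     rev_evens, odds = [], []
--     take_even = True
--     for card in list_cards:
--         if take_even:
--             rev_evens.append(card)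
--         else:
--             odds.append(card)
--         take_even = not take_even
--     rev_evens.reverse()
--     return rev_evens + odds
-- ===== Notes on version B (the rewrite author's own statement) =====
-- stated objective: faster
-- what changed: Instead of alternately inserting at the front of one pile (O(n) per even card), B appends even- and odd-position cards to two separate lists in one pass and reverses the even list once at the end.
import Mathlib
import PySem

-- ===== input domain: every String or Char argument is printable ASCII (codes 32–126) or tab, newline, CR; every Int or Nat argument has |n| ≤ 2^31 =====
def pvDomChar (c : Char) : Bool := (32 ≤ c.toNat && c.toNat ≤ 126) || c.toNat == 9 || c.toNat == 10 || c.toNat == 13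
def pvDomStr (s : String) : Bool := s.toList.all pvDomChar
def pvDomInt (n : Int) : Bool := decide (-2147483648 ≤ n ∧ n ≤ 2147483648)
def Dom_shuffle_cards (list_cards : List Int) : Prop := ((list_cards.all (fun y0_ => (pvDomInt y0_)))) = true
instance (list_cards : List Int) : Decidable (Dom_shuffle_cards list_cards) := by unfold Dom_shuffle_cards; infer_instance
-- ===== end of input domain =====

-- B replaces A's alternating front-insertion into one pile by one append-only pass into
-- two piles with a parity toggle plus a single final reverse (objective: faster).

-- ===== PORT A =====
def shuffle_cards (list_cards : List Int) : List Int :=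
  (PySem.List.enumerate list_cards 0).foldl
    (fun second_pile ic =>
      if PySem.Int.mod ic.1 2 == 0 then ic.2 :: second_pile else second_pile ++ [ic.2])
    []

-- ===== PORT B =====
def shuffle_cards_alt (list_cards : List Int) : List Int :=
  let r := list_cards.foldl
    (fun (s : Bool × List Int × List Int) card =>
      if s.1 then (!s.1, s.2.1 ++ [card], s.2.2) else (!s.1, s.2.1, s.2.2 ++ [card]))
    (true, [], [])
  r.2.1.reverse ++ r.2.2

-- ===== PRECONDITION & SPEC =====
def Spec_shuffle_cards (list_cards : List Int) (out : List Int) : Prop := out = shuffle_cards_alt list_cards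
instance (list_cards : List Int) (out : List Int) : Decidable (Spec_shuffle_cards list_cards out) := by unfold Spec_shuffle_cards; infer_instance

-- ===== CLAIM (what is proved, stated in full; the proofs are below) =====
def Claim_equal_shuffle_cards : Prop := ∀ (list_cards : List Int), Dom_shuffle_cards list_cards → Spec_shuffle_cards list_cards (shuffle_cards list_cards)

-- ===== LEMMAS AND PROOFS =====

-- cards at even toggle positions (in order)
def selE : Bool → List Int → List Int
  | _, [] => []
  | b, x :: xs => if b then x :: selE (!b) xs else selE (!b) xs

-- cards at odd toggle positions (in order)
def selO : Bool → List Int → List Int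
  | _, [] => []
  | b, x :: xs => if b then selO (!b) xs else x :: selO (!b) xs

-- final toggle value
def selB : Bool → List Int → Bool
  | b, [] => b
  | b, _ :: xs => selB (!b) xs

theorem mod_two_succ_beq (i : Int) :
    (PySem.Int.mod (i + 1) 2 == 0) = !(PySem.Int.mod i 2 == 0) := by
  rw [PySem.Int.mod_eq_emod_of_pos (show (0:Int) < 2 by omega),
      PySem.Int.mod_eq_emod_of_pos (show (0:Int) < 2 by omega)]
  rcases Int.emod_two_eq i with h | h
  · have h1 : (i + 1) % 2 = 1 := by omega
    simp [h, h1]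
  · have h1 : (i + 1) % 2 = 0 := by omega
    simp [h, h1]

theorem foldA_eq (l : List Int) : ∀ (i : Int) (acc : List Int),
    (PySem.List.enumerate l i).foldl
      (fun second_pile ic =>
        if PySem.Int.mod ic.1 2 == 0 then ic.2 :: second_pile else second_pile ++ [ic.2]) acc
    = (selE (PySem.Int.mod i 2 == 0) l).reverse ++ acc ++ selO (PySem.Int.mod i 2 == 0) l := by
  induction l with
  | nil => intro i acc; simp [PySem.List.enumerate_nil, selE, selO]
  | cons x xs ih =>
    intro i acc
    rw [PySem.List.enumerate_cons, List.foldl_cons]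
    cases hb : (PySem.Int.mod i 2 == 0) with
    | true =>
      rw [if_pos (by simp), ih (i + 1), mod_two_succ_beq, hb]
      simp [selE, selO]
    | false =>
      rw [if_neg (by simp), ih (i + 1), mod_two_succ_beq, hb]
      simp [selE, selO]

theorem foldB_eq (l : List Int) : ∀ (b : Bool) (e o : List Int),
    l.foldl
      (fun (s : Bool × List Int × List Int) card =>
        if s.1 then (!s.1, s.2.1 ++ [card], s.2.2) else (!s.1, s.2.1, s.2.2 ++ [card]))
      (b, e, o)
    = (selB b l, e ++ selE b l, o ++ selO b l) := by
  induction l with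
  | nil => intro b e o; simp [selB, selE, selO]
  | cons x xs ih =>
    intro b e o
    cases b with
    | true => simp [List.foldl_cons, ih, selB, selE, selO]
    | false => simp [List.foldl_cons, ih, selB, selE, selO]

-- ===== VERDICT (by name: the statement is the Claim_ definition above) =====
theorem shuffle_cards_spec : Claim_equal_shuffle_cards := by
  intro l _
  unfold Spec_shuffle_cards shuffle_cards shuffle_cards_alt
  rw [foldA_eq, foldB_eq]
  norm_num [selE]
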